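-- pv_equiv track=rewrite | github.com/AlexisR13/Coding_Weeks-Sudoku | Resolution/resolution_optimisée.py | carre
-- ===== SOURCE A (Python) =====
-- def carre(grille,i,j):
--     """on retire de la case (i,j) les valeurs qui sont déjà attribuées dans le carré contenant (i,j)"""
--     modif_3=False
--     for k in range(3*int(i//3),3*(int(i//3+1))):
--         for l in range(3*int(j//3),3*(int(j//3+1))):
--             if len(grille[k][l])==1:
--                 if grille[k][l][0] in grille[i][j] and (k,l)!=(i,j):
--                     grille[i][j].remove(grille[k][l][0])
--                     modif_3=True
--     return(modif_3)
-- ===== SOURCE B (Python) =====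
-- def carre(grille, i, j):
--     """on retire de la case (i,j) les valeurs qui sont deja attribuees dans le carre contenant (i,j)"""
--     cell = grille[i][j]
--     bi, bj = 3 * (i // 3), 3 * (j // 3)
--
--     def assigned_elsewhere(v):
--         # is v the value of a singleton box cell other than (i,j)?
--         return any(len(grille[k][l]) == 1 and grille[k][l][0] == v and (k, l) != (i, j)
--                    for k in range(bi, bi + 3) for l in range(bj, bj + 3))
--
--     kept = [v for v in cell if not assigned_elsewhere(v)]
--     changed = len(kept) != len(cell)
--     cell[:] = kept  # mutate the existing list in place
--     return changed
-- ===== Notes on version B (the rewrite author's own statement) =====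
-- stated objective: alternative
-- what changed: B inverts the traversal: instead of scanning the 3x3 box and removing each found value from the candidate cell, it iterates over the candidate cell, filters out each value for which a box-singleton predicate holds, slice-assigns the filtered list back, and returns whether the length changed.
import Mathlib
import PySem

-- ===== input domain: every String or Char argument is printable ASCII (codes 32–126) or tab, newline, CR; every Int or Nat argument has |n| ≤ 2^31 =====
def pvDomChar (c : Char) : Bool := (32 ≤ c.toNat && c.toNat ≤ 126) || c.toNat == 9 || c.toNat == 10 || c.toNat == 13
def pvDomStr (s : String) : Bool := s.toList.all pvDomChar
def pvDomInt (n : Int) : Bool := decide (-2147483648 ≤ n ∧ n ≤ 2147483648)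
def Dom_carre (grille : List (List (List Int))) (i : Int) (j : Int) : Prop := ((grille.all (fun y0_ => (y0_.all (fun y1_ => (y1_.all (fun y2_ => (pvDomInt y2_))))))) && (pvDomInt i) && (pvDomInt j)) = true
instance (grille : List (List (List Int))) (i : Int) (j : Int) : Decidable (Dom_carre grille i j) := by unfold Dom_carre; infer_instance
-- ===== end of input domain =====

-- ===== PORT A =====
-- B inverts A's traversal (filter the candidate cell against a box predicate instead of scanning the
-- box and removing); equivalence proved here is about the RETURN value only: on duplicate candidate
-- values A removes one occurrence per matching box cell while B removes every occurrence.
-- grille[k][l] as read from the (unmutated) grid; total via defaults, exact under Pre_carre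
def pvCell (grille : List (List (List Int))) (k l : Int) : List Int :=
  PySem.List.pyGetD (PySem.List.pyGetD grille k []) l []

-- one body of A's inner loop; st.1 is the current (possibly already-shrunk) grille[i][j], st.2 is
-- modif_3; grille[k][l] is the mutated cell exactly when (k,l) = (i,j) (then the (k,l) != (i,j)
-- guard blocks the removal branch)
def pvStepA (grille : List (List (List Int))) (i j : Int) (st : List Int × Bool) (k l : Int) :
    List Int × Bool :=
  if (if k = i ∧ l = j then st.1 else pvCell grille k l).length = 1 then
    if PySem.List.pyGetD (if k = i ∧ l = j then st.1 else pvCell grille k l) 0 0 ∈ st.1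
        ∧ ¬(k = i ∧ l = j) then
      ((PySem.List.remove? st.1
          (PySem.List.pyGetD (if k = i ∧ l = j then st.1 else pvCell grille k l) 0 0)).getD st.1,
        true)
    else st
  else st

def carre (grille : List (List (List Int))) (i : Int) (j : Int) : Bool :=
  ((PySem.List.pyRange (3 * PySem.Int.floordiv i 3) (3 * (PySem.Int.floordiv i 3 + 1)) 1).foldl
    (fun st k =>
      (PySem.List.pyRange (3 * PySem.Int.floordiv j 3) (3 * (PySem.Int.floordiv j 3 + 1)) 1).foldl
        (fun st l => pvStepA grille i j st k l) st)
    (pvCell grille i j, false)).2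

-- ===== PORT B =====
-- Source B's assigned_elsewhere(v): v is the value of a singleton box cell other than (i,j)
-- (reads the unmutated grid: Source B builds `kept` completely before the slice assignment)
def pvAssigned (grille : List (List (List Int))) (i j : Int) (v : Int) : Bool :=
  (PySem.List.pyRange (3 * PySem.Int.floordiv i 3) (3 * PySem.Int.floordiv i 3 + 3) 1).any
    (fun k =>
      (PySem.List.pyRange (3 * PySem.Int.floordiv j 3) (3 * PySem.Int.floordiv j 3 + 3) 1).any
        (fun l =>
          (pvCell grille k l).length == 1 && PySem.List.pyGetD (pvCell grille k l) 0 0 == v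
            && !(decide (k = i ∧ l = j))))

-- kept = the comprehension; changed = len(kept) != len(cell) (the slice assignment is a mutation,
-- invisible in the return value)
def carre_alt (grille : List (List (List Int))) (i : Int) (j : Int) : Bool :=
  let cell := pvCell grille i j
  let kept := cell.filter (fun v => ! pvAssigned grille i j v)
  kept.length != cell.length

-- ===== PRECONDITION & SPEC =====
-- Exactly the inputs where every grille[k][l] access of the 3x3 box scan is in range (Python
-- negative indices included); outside it A raises IndexError. (i,j) itself lies in the box.
def Pre_carre (grille : List (List (List Int))) (i : Int) (j : Int) : Prop :=
  ∀ k ∈ PySem.List.pyRange (3 * PySem.Int.floordiv i 3) (3 * PySem.Int.floordiv i 3 + 3) 1,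
    PySem.Raise.InRange grille.length k ∧
    ∀ l ∈ PySem.List.pyRange (3 * PySem.Int.floordiv j 3) (3 * PySem.Int.floordiv j 3 + 3) 1,
      PySem.Raise.InRange (PySem.List.pyGetD grille k []).length l
instance (grille : List (List (List Int))) (i : Int) (j : Int) : Decidable (Pre_carre grille i j) := by
  unfold Pre_carre; infer_instance

def pvWitness_carre : List (List (List Int)) × Int × Int :=
  ([[[1], [1, 2], [3]], [[4], [5], [2, 6]], [[7], [8], [9]]], 0, 1)

def Spec_carre (grille : List (List (List Int))) (i : Int) (j : Int) (out : Bool) : Prop := out = carre_alt grille i j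
instance (grille : List (List (List Int))) (i : Int) (j : Int) (out : Bool) : Decidable (Spec_carre grille i j out) := by unfold Spec_carre; infer_instance

-- ===== CLAIM (what is proved, stated in full; the proofs are below) =====
def Claim_equal_carre : Prop := ∀ (grille : List (List (List Int))) (i : Int) (j : Int), Dom_carre grille i j → Pre_carre grille i j → Spec_carre grille i j (carre grille i j)

-- ===== LEMMAS AND PROOFS =====

-- box cell (k,l) is a singleton other than (i,j)
def pvCondB (grille : List (List (List Int))) (i j : Int) (p : Int × Int) : Bool :=
  decide (¬(p.1 = i ∧ p.2 = j) ∧ (pvCell grille p.1 p.2).length = 1)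

def pvVal (grille : List (List (List Int))) (p : Int × Int) : Int :=
  PySem.List.pyGetD (pvCell grille p.1 p.2) 0 0

theorem pvFoldA_true (grille : List (List (List Int))) (i j : Int)
    (ps : List (Int × Int)) (cell : List Int) :
    (ps.foldl (fun st p => pvStepA grille i j st p.1 p.2) (cell, true)).2 = true := by
  induction ps generalizing cell with
  | nil => rfl
  | cons p ps ih =>
    simp only [List.foldl_cons]
    have h : ∃ c', pvStepA grille i j (cell, true) p.1 p.2 = (c', true) := by
      unfold pvStepA
      split_ifs <;> exact ⟨_, rfl⟩
    obtain ⟨c', hc⟩ := h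
    rw [hc]; exact ih c'

-- A's flag over a list of box coordinates: true iff some singleton cell other than (i,j) carries a
-- value of the ORIGINAL candidate cell (the cell only shrinks, and the first hit fixes the flag)
theorem pvFoldA_false (grille : List (List (List Int))) (i j : Int)
    (ps : List (Int × Int)) (cell : List Int) :
    (ps.foldl (fun st p => pvStepA grille i j st p.1 p.2) (cell, false)).2
      = ps.any (fun p => pvCondB grille i j p && decide (pvVal grille p ∈ cell)) := by
  induction ps generalizing cell with
  | nil => rfl
  | cons p ps ih =>
    simp only [List.foldl_cons, List.any_cons]
    by_cases hne : p.1 = i ∧ p.2 = j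
    · have hstep : pvStepA grille i j (cell, false) p.1 p.2 = (cell, false) := by
        unfold pvStepA
        split_ifs with h1 h2
        · exact absurd hne h2.2
        · rfl
        · rfl
      rw [hstep, ih]
      simp [pvCondB, hne]
    · by_cases hlen : (pvCell grille p.1 p.2).length = 1
      · by_cases hmem : pvVal grille p ∈ cell
        · have hstep : pvStepA grille i j (cell, false) p.1 p.2
              = ((PySem.List.remove? cell (pvVal grille p)).getD cell, true) := by
            unfold pvStepA
            rw [if_neg hne, if_pos hlen, if_pos ⟨hmem, hne⟩]; rfl
          rw [hstep, pvFoldA_true]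
          simp [pvCondB, hne, hlen, pvVal] at hmem ⊢
          exact Or.inl hmem
        · have hstep : pvStepA grille i j (cell, false) p.1 p.2 = (cell, false) := by
            unfold pvStepA
            rw [if_neg hne, if_pos hlen, if_neg (by exact fun h => hmem h.1)]
          rw [hstep, ih]
          simp [pvCondB, hne, hlen, pvVal] at hmem ⊢
          intro h; exact absurd h hmem
      · have hstep : pvStepA grille i j (cell, false) p.1 p.2 = (cell, false) := by
          unfold pvStepA
          rw [if_neg hne, if_neg hlen]
        rw [hstep, ih]
        simp [pvCondB, hlen]

-- Source B's predicate, phrased over coordinate pairs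
theorem pvAssigned_iff (grille : List (List (List Int))) (i j v : Int) :
    pvAssigned grille i j v = true
      ↔ ∃ p ∈ (PySem.List.pyRange (3 * PySem.Int.floordiv i 3) (3 * PySem.Int.floordiv i 3 + 3) 1).flatMap
            (fun k => (PySem.List.pyRange (3 * PySem.Int.floordiv j 3) (3 * PySem.Int.floordiv j 3 + 3) 1).map
              (fun l => (k, l))),
          pvCondB grille i j p = true ∧ pvVal grille p = v := by
  unfold pvAssigned
  simp only [List.any_eq_true, List.mem_flatMap, List.mem_map, Bool.and_eq_true, beq_iff_eq,
    Bool.not_eq_eq_eq_not, Bool.not_true, decide_eq_false_iff_not]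
  constructor
  · rintro ⟨k, hk, l, hl, ⟨hlen, hval⟩, hne⟩
    exact ⟨(k, l), ⟨k, hk, l, hl, rfl⟩, by simp [pvCondB, hne, hlen], hval⟩
  · rintro ⟨p, ⟨k, hk, l, hl, rfl⟩, hc, hval⟩
    simp only [pvCondB, decide_eq_true_eq] at hc
    exact ⟨k, hk, l, hl, ⟨hc.2, hval⟩, hc.1⟩

theorem pvFilter_length_ne (cell : List Int) (p : Int → Bool) :
    ((cell.filter (fun v => ! p v)).length != cell.length) = cell.any p := by
  rw [Bool.eq_iff_iff]
  simp only [bne_iff_ne, ne_eq, List.any_eq_true]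
  constructor
  · intro h
    by_contra hno
    push Not at hno
    apply h
    rw [List.filter_eq_self.2]
    intro a ha
    simp [hno a ha]
  · rintro ⟨a, ha, hpa⟩ hlen
    have heq := (List.filter_sublist (l := cell) (p := fun v => ! p v)).eq_of_length hlen
    have ham : a ∈ cell.filter (fun v => ! p v) := by rw [heq]; exact ha
    simp [hpa] at ham

theorem carre_spec' (grille : List (List (List Int))) (i j : Int) :
    carre grille i j = carre_alt grille i j := by
  have h3i : 3 * (PySem.Int.floordiv i 3 + 1) = 3 * PySem.Int.floordiv i 3 + 3 := by ring
  have h3j : 3 * (PySem.Int.floordiv j 3 + 1) = 3 * PySem.Int.floordiv j 3 + 3 := by ring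
  unfold carre carre_alt
  rw [h3i, h3j]
  have hA : ∀ (ks ls : List Int) (st : List Int × Bool),
      ks.foldl (fun st k => ls.foldl (fun st l => pvStepA grille i j st k l) st) st
        = (ks.flatMap (fun k => ls.map (fun l => (k, l)))).foldl
            (fun st p => pvStepA grille i j st p.1 p.2) st := by
    intro ks ls st
    rw [List.foldl_flatMap]
    simp only [List.foldl_map]
  rw [hA, pvFoldA_false, pvFilter_length_ne]
  rw [Bool.eq_iff_iff]
  simp only [List.any_eq_true, Bool.and_eq_true, decide_eq_true_eq]
  constructor
  · rintro ⟨p, hp, hc, hm⟩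
    exact ⟨pvVal grille p, hm, (pvAssigned_iff grille i j _).2 ⟨p, hp, hc, rfl⟩⟩
  · rintro ⟨v, hv, ha⟩
    obtain ⟨p, hp, hc, rfl⟩ := (pvAssigned_iff grille i j v).1 ha
    exact ⟨p, hp, hc, hv⟩

-- ===== VERDICT (by name: the statement is the Claim_ definition above) =====
theorem carre_spec : Claim_equal_carre := by
  intro grille i j _ _
  unfold Spec_carre
  exact carre_spec' grille i j
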